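-- pv_equiv track=rewrite | github.com/willcodefortea/pytudes | aoc/2023/day3.py | build_engine_graph
-- ===== SOURCE A (Python) =====
-- def get_neighbours(x: int, y: int, grid: list[str]):
--     neighbours_8 = (-1, 0), (-1, 1), (0, 1), (1, 1), (1, 0), (1, -1), (0, -1), (-1, -1)
--
--     neighbours: list[tuple[int, int, str]] = []
--     for dx, dy in neighbours_8:
--         try:
--             neighbours.append(
--                 (
--                     x + dx,
--                     y + dy,
--                     grid[y + dy][x + dx],
--                 )
--             )
--         except IndexError:
--             continue
--
--     return neighbours
--
-- def build_engine_graph(engine: list[str]):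
--     graphs = []
--
--     numbers = "0123456789"
--
--     for y, line in enumerate(engine):
--         part = ""
--         symbols = set()
--
--         for x, char in enumerate(line):
--             if char not in numbers:
--                 if part:
--                     graphs.append((int(part), symbols))
--
--                 # reset
--                 symbols = set()
--                 part = ""
--                 continue
--
--             part += char
--             for nx, ny, neighbour in get_neighbours(x, y, engine):
--                 is_symbol = neighbour not in "." + numbers
--                 if is_symbol:
--                     symbols.add((nx, ny, neighbour))
--
--         if part:
--             # reset
--             graphs.append((int(part), symbols))
--             part = ""
--             symbols = set()
--
--     return graphs
-- ===== SOURCE B (Python) =====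
-- def get_neighbours(x: int, y: int, grid: list[str]):
--     neighbours_8 = (-1, 0), (-1, 1), (0, 1), (1, 1), (1, 0), (1, -1), (0, -1), (-1, -1)
--
--     neighbours: list[tuple[int, int, str]] = []
--     for dx, dy in neighbours_8:
--         try:
--             neighbours.append(
--                 (
--                     x + dx,
--                     y + dy,
--                     grid[y + dy][x + dx],
--                 )
--             )
--         except IndexError:
--             continue
--
--     return neighbours
--
--
-- def _digit_runs(line: str):
--     """Maximal runs of ASCII digits as (start, end, run) triples, by index scan."""
--     runs = []
--     i = 0
--     n = len(line)
--     while i < n: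
--         if "0" <= line[i] <= "9":
--             j = i
--             run = ""
--             while j < n and "0" <= line[j] <= "9":
--                 run += line[j]
--                 j += 1
--             runs.append((i, j, run))
--             i = j
--         else:
--             i += 1
--     return runs
--
--
-- def build_engine_graph(engine: list[str]):
--     graphs = []
--     for y, line in enumerate(engine):
--         for start, end, run in _digit_runs(line):
--             symbols = set()
--             for x in range(start, end):
--                 for nx, ny, neighbour in get_neighbours(x, y, engine):
--                     if neighbour not in ".0123456789":
--                         symbols.add((nx, ny, neighbour))
--             graphs.append((int(run), symbols))
--     return graphs
-- ===== Notes on version B (the rewrite author's own statement) =====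
-- stated objective: alternative
-- what changed: Replaces A's per-character state machine (pending part string, interleaved symbol collection, reset logic) by an index-first scan that finds each maximal digit run and then builds that run's symbol set independently over range(start, end).
import Mathlib
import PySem

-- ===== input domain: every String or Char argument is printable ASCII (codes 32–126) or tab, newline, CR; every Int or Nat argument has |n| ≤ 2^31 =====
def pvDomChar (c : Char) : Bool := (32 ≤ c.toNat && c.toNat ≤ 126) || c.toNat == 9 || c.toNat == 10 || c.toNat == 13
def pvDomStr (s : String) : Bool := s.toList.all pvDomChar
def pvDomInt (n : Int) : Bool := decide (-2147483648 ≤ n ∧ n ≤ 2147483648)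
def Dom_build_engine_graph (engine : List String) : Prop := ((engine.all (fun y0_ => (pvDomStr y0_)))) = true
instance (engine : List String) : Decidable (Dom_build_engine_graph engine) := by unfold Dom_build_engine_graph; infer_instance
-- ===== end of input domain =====

-- B replaces A's char-by-char state machine by an index-first scan for maximal digit
-- runs, then collects each run's adjacent symbols independently (objective: alternative).

-- ===== PORT A =====
-- shared helper (both Pythons call the very same get_neighbours);
-- negative indices wrap (Python semantics, via pyGet?); none = IndexError = skipped
def get_neighbours (x y : Int) (grid : List String) : List (Int × Int × String) :=
  [((-1 : Int), (0 : Int)), (-1, 1), (0, 1), (1, 1), (1, 0), (1, -1), (0, -1), (-1, -1)].foldl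
    (fun acc d =>
      match PySem.List.pyGet? grid (y + d.2) with
      | none => acc
      | some row =>
        match PySem.Str.pyGet? row (x + d.1) with
        | none => acc
        | some c => acc ++ [(x + d.1, y + d.2, String.ofList [c])]) []

-- int(part): part is a nonempty digit run, so int() never raises; the getD 0 is unreachable
def pyInt (p : List Char) : Int := (PySem.Int.ofChars? p).getD 0

-- the loop body both Pythons contain verbatim:
-- "for nx,ny,neighbour in get_neighbours(...): if neighbour not in '.'+numbers: symbols.add(...)"
def addSyms (engine : List String) (y x : Int) (s : PySem.Set (Int × Int × String)) :
    PySem.Set (Int × Int × String) :=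
  (get_neighbours x y engine).foldl
    (fun s nb => if PySem.Str.isIn nb.2.2 ".0123456789" then s else PySem.Set.add s nb) s

-- numbers = "0123456789" as chars
def pvNumbers : List Char := ['0', '1', '2', '3', '4', '5', '6', '7', '8', '9']

-- 'for x, char in enumerate(line)': structural recursion carrying the enumerate counter x;
-- state = (graphs, part, symbols)
def lineLoopA (engine : List String) (y : Int) :
    List Char → Int → List Char → PySem.Set (Int × Int × String) →
    List (Int × (List (Int × Int × String))) →
    List (Int × (List (Int × Int × String))) × List Char × PySem.Set (Int × Int × String)
  | [], _, p, s, g => (g, p, s)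
  | c :: cs, x, p, s, g =>
    if pvNumbers.contains c = false then
      lineLoopA engine y cs (x + 1) [] PySem.Set.empty
        (if p.isEmpty then g else g ++ [(pyInt p, s)])
    else
      lineLoopA engine y cs (x + 1) (p ++ [c]) (addSyms engine y x s) g

def build_engine_graph (engine : List String) : List (Int × (List (Int × Int × String))) :=
  (PySem.List.enumerate engine 0).foldl
    (fun g yl =>
      let r := lineLoopA engine yl.1 yl.2.toList 0 [] PySem.Set.empty g
      -- trailing 'if part: graphs.append((int(part), symbols))'
      if r.2.1.isEmpty then r.1 else r.1 ++ [(pyInt r.2.1, r.2.2)]) []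

-- ===== PORT B =====
def isDig (c : Char) : Bool := decide ('0' ≤ c ∧ c ≤ '9')

-- index-first scan for maximal digit runs: (start, end, run chars);
-- the inner "while j < n and '0' <= line[j] <= '9': run += line[j]; j += 1" is the takeWhile
def digitRuns : List Char → Int → List (Int × Int × List Char)
  | [], _ => []
  | c :: cs, i =>
    if isDig c then
      let ds := cs.takeWhile isDig
      (i, i + 1 + ds.length, c :: ds) :: digitRuns (cs.drop ds.length) (i + 1 + ds.length)
    else digitRuns cs (i + 1)
  termination_by cs _ => cs.length
  decreasing_by
    · simp only [List.length_cons, List.length_drop]; omega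
    · simp

-- 'symbols = set(); for x in range(start, end): …'
def runSymbols (engine : List String) (y start stop : Int) : PySem.Set (Int × Int × String) :=
  (PySem.List.pyRange start stop 1).foldl (fun s x => addSyms engine y x s) PySem.Set.empty

def build_engine_graph_alt (engine : List String) : List (Int × (List (Int × Int × String))) :=
  (PySem.List.enumerate engine 0).foldl
    (fun g yl =>
      (digitRuns yl.2.toList 0).foldl
        (fun g r => g ++ [(pyInt r.2.2, runSymbols engine yl.1 r.1 r.2.1)]) g) []

-- ===== PRECONDITION & SPEC =====
def Spec_build_engine_graph (engine : List String) (out : List (Int × (List (Int × Int × String)))) : Prop := out = build_engine_graph_alt engine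
instance (engine : List String) (out : List (Int × (List (Int × Int × String)))) : Decidable (Spec_build_engine_graph engine out) := by unfold Spec_build_engine_graph; infer_instance

-- ===== CLAIM (what is proved, stated in full; the proofs are below) =====
def Claim_equal_build_engine_graph : Prop := ∀ (engine : List String), Dom_build_engine_graph engine → Spec_build_engine_graph engine (build_engine_graph engine)

-- ===== LEMMAS AND PROOFS =====

-- A's digit test (membership in "0123456789") is B's '0' ≤ c ≤ '9'
theorem contains_eq_isDig (c : Char) : pvNumbers.contains c = isDig c := by
  rw [Bool.eq_iff_iff]
  simp only [pvNumbers, isDig, List.contains_eq_any_beq, List.any_cons, List.any_nil,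
    Bool.or_eq_true, beq_iff_eq, decide_eq_true_eq, Bool.false_eq_true, or_false]
  constructor
  · rintro (rfl | rfl | rfl | rfl | rfl | rfl | rfl | rfl | rfl | rfl) <;>
      exact ⟨by decide, by decide⟩
  · rintro ⟨h1, h2⟩
    have hl : 48 ≤ c.toNat := h1
    have hr : c.toNat ≤ 57 := h2
    have hofc : Char.ofNat c.toNat = c := Char.ofNat_toNat c
    have hten : c.toNat = 48 ∨ c.toNat = 49 ∨ c.toNat = 50 ∨ c.toNat = 51 ∨ c.toNat = 52 ∨
        c.toNat = 53 ∨ c.toNat = 54 ∨ c.toNat = 55 ∨ c.toNat = 56 ∨ c.toNat = 57 := by omega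
    rcases hten with h | h | h | h | h | h | h | h | h | h <;>
      (rw [h] at hofc; rw [← hofc]; decide)

-- one-step reduction lemmas for the two ports' scanners
theorem lineLoopA_cons_dig (engine : List String) (y : Int) (c : Char) (cs : List Char)
    (x : Int) (p : List Char) (s : PySem.Set (Int × Int × String))
    (g : List (Int × (List (Int × Int × String)))) (h : pvNumbers.contains c = true) :
    lineLoopA engine y (c :: cs) x p s g =
      lineLoopA engine y cs (x + 1) (p ++ [c]) (addSyms engine y x s) g := by
  simp only [lineLoopA]
  rw [if_neg (by simp only [h]; decide)]

theorem lineLoopA_cons_nondig (engine : List String) (y : Int) (c : Char) (cs : List Char)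
    (x : Int) (p : List Char) (s : PySem.Set (Int × Int × String))
    (g : List (Int × (List (Int × Int × String)))) (h : pvNumbers.contains c = false) :
    lineLoopA engine y (c :: cs) x p s g =
      lineLoopA engine y cs (x + 1) [] PySem.Set.empty
        (if p.isEmpty then g else g ++ [(pyInt p, s)]) := by
  simp only [lineLoopA]
  rw [if_pos h]

theorem digitRuns_nil (i : Int) : digitRuns [] i = [] := by
  rw [digitRuns.eq_def]

theorem digitRuns_cons_dig (c : Char) (cs : List Char) (i : Int) (h : isDig c = true) :
    digitRuns (c :: cs) i =
      (i, i + 1 + ((cs.takeWhile isDig).length : Int), c :: cs.takeWhile isDig) ::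
        digitRuns (cs.drop (cs.takeWhile isDig).length)
          (i + 1 + ((cs.takeWhile isDig).length : Int)) := by
  conv_lhs => rw [digitRuns.eq_def]
  simp [h]

theorem digitRuns_cons_nondig (c : Char) (cs : List Char) (i : Int) (h : isDig c = false) :
    digitRuns (c :: cs) i = digitRuns cs (i + 1) := by
  conv_lhs => rw [digitRuns.eq_def]
  simp [h]

-- cs.drop (takeWhile p cs).length is the dropWhile
theorem drop_takeWhile_length (p : Char → Bool) (l : List Char) :
    l.drop (l.takeWhile p).length = l.dropWhile p := by
  induction l with
  | nil => simp
  | cons c cs ih => by_cases h : p c <;> simp [h, ih]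

-- the first element after a dropWhile fails the predicate
theorem dropWhile_head_false (p : Char → Bool) (l : List Char) (r : Char) (rs : List Char)
    (h : l.dropWhile p = r :: rs) : p r = false := by
  have := List.dropWhile_get_zero_not p l (by simp [h])
  simpa [h] using this

-- generalized 'for x in range(a,b)' symbol fold (runSymbols with an arbitrary seed)
def symsFrom (engine : List String) (y a b : Int) (s : PySem.Set (Int × Int × String)) :
    PySem.Set (Int × Int × String) :=
  (PySem.List.pyRange a b 1).foldl (fun s x => addSyms engine y x s) s

theorem runSymbols_eq (engine : List String) (y a b : Int) :
    runSymbols engine y a b = symsFrom engine y a b PySem.Set.empty := rfl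

-- A consuming a block of digits = extending part and folding the symbol scan over the block
theorem lineLoopA_digits (engine : List String) (y : Int) :
    ∀ (ds : List Char), ds.all isDig = true → ∀ cs x p s g,
    lineLoopA engine y (ds ++ cs) x p s g =
      lineLoopA engine y cs (x + ds.length) (p ++ ds) (symsFrom engine y x (x + ds.length) s) g := by
  intro ds
  induction ds with
  | nil => intro _ cs x p s g; simp [symsFrom, PySem.List.pyRange]
  | cons d ds ih =>
    intro hall cs x p s g
    simp only [List.all_cons, Bool.and_eq_true] at hall
    have hd : pvNumbers.contains d = true := by rw [contains_eq_isDig]; exact hall.1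
    rw [List.cons_append, lineLoopA_cons_dig engine y d (ds ++ cs) x p s g hd, ih hall.2]
    have hx : (x + ((d :: ds).length : Int)) = (x + 1) + (ds.length : Int) := by
      simp only [List.length_cons]; push_cast; ring
    rw [hx]
    have hs : symsFrom engine y x ((x + 1) + (ds.length : Int)) s =
        symsFrom engine y (x + 1) ((x + 1) + (ds.length : Int)) (addSyms engine y x s) := by
      unfold symsFrom
      conv_lhs => rw [PySem.List.pyRange_one_cons (show x < (x + 1) + (ds.length : Int) by omega)]
      rfl
    rw [hs]
    simp

-- per-line equivalence: A's state machine from an empty pending state equals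
-- B's run-scan fold, for any start column and accumulated graphs
theorem line_eq (engine : List String) (y : Int) :
    ∀ (n : Nat) (cs : List Char), cs.length ≤ n → ∀ (x : Int) g,
    (let r := lineLoopA engine y cs x [] PySem.Set.empty g
     if r.2.1.isEmpty then r.1 else r.1 ++ [(pyInt r.2.1, r.2.2)]) =
    (digitRuns cs x).foldl
      (fun g r => g ++ [(pyInt r.2.2, runSymbols engine y r.1 r.2.1)]) g := by
  intro n
  induction n with
  | zero =>
    intro cs hlen x g
    have : cs = [] := List.eq_nil_of_length_eq_zero (Nat.le_zero.mp hlen)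
    subst this
    simp [lineLoopA, digitRuns_nil]
  | succ n ih =>
    intro cs hlen x g
    match cs with
    | [] => simp [lineLoopA, digitRuns_nil]
    | c :: cs' =>
      have hlen' : cs'.length ≤ n := by
        simp only [List.length_cons] at hlen; omega
      by_cases hc : isDig c = true
      · -- head is a digit: A eats the whole run; B records it as one entry
        have hcc : pvNumbers.contains c = true := by rw [contains_eq_isDig]; exact hc
        have hsplit : cs' = cs'.takeWhile isDig ++ cs'.drop (cs'.takeWhile isDig).length := by
          rw [drop_takeWhile_length]; exact (List.takeWhile_append_dropWhile).symm
        have hall : (cs'.takeWhile isDig).all isDig = true := List.all_takeWhile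
        -- one A-step, then the digit-block lemma eats the run
        have hA : lineLoopA engine y (c :: cs') x [] PySem.Set.empty g =
            lineLoopA engine y (cs'.drop (cs'.takeWhile isDig).length)
              (x + 1 + ((cs'.takeWhile isDig).length : Int)) (c :: cs'.takeWhile isDig)
              (symsFrom engine y (x + 1) (x + 1 + ((cs'.takeWhile isDig).length : Int))
                (addSyms engine y x PySem.Set.empty)) g := by
          rw [lineLoopA_cons_dig engine y c cs' x [] PySem.Set.empty g hcc]
          conv_lhs => rw [hsplit]
          rw [lineLoopA_digits engine y _ hall]
          simp only [List.singleton_append, List.nil_append]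
        have hS : symsFrom engine y (x + 1) (x + 1 + ((cs'.takeWhile isDig).length : Int))
              (addSyms engine y x PySem.Set.empty) =
            runSymbols engine y x (x + 1 + ((cs'.takeWhile isDig).length : Int)) := by
          rw [runSymbols_eq]
          unfold symsFrom
          conv_rhs => rw [PySem.List.pyRange_one_cons
            (show x < x + 1 + ((cs'.takeWhile isDig).length : Int) by omega)]
          rfl
        have hB := digitRuns_cons_dig c cs' x hc
        cases hrest : cs'.drop (cs'.takeWhile isDig).length with
        | nil =>
          rw [hrest] at hA
          simp only [hA]
          simp only [lineLoopA]
          rw [hS, hB, hrest, digitRuns_nil]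
          simp
        | cons r rest' =>
          have hr : isDig r = false := by
            apply dropWhile_head_false isDig cs'
            rw [← drop_takeWhile_length, hrest]
          have hrc : pvNumbers.contains r = false := by rw [contains_eq_isDig]; exact hr
          have hlen'' : rest'.length ≤ n := by
            have h1 : (r :: rest').length = cs'.length - (cs'.takeWhile isDig).length := by
              rw [← hrest, List.length_drop]
            simp only [List.length_cons] at h1
            omega
          rw [hrest] at hA
          simp only [hA, hS,
            lineLoopA_cons_nondig engine y r rest' _ (c :: cs'.takeWhile isDig) _ g hrc,
            List.isEmpty_cons, Bool.false_eq_true, if_false, hB, hrest,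
            digitRuns_cons_nondig r rest' _ hr, List.foldl_cons]
          exact ih rest' hlen'' _ _
      · -- head is not a digit: both sides just move on
        have hcb : isDig c = false := by simpa using hc
        have hcc : pvNumbers.contains c = false := by rw [contains_eq_isDig]; exact hcb
        simp only [lineLoopA_cons_nondig engine y c cs' x [] PySem.Set.empty g hcc,
          List.isEmpty_nil, if_true, digitRuns_cons_nondig c cs' x hcb]
        exact ih cs' hlen' (x + 1) g

-- ===== VERDICT (by name: the statement is the Claim_ definition above) =====
theorem build_engine_graph_spec : Claim_equal_build_engine_graph := by
  intro engine _
  unfold Spec_build_engine_graph build_engine_graph build_engine_graph_alt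
  apply PySem.List.foldl_congr_mem
  intro g yl _
  exact line_eq engine yl.1 yl.2.toList.length yl.2.toList le_rfl 0 g
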